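-- pv_equiv track=rewrite | github.com/TomoShishido/img2xml | bfaaap/makeyolomusicdict/generatedictforxml.py | calculateDurationForEachVoiceInvodMS
-- ===== SOURCE A (Python) =====
-- import copy
--
-- def calculateDurationForEachVoiceInvodMS(vodMS_input):
--     vodMS = copy.copy(vodMS_input)
--     durationlist_temp_voice1 = []
--     durationlist_temp_voice2 = []
--     for eachMS in vodMS:
--         if eachMS['voice'] == 1:
--             durationlist_temp_voice1.append(eachMS['duration'])
--         elif eachMS['voice'] == 2:
--             durationlist_temp_voice2.append(eachMS['duration'])
--     # set the maximum duration in each duration list as a duration for each voice in the vodMS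
--     if len(durationlist_temp_voice1) >0:
--         duration_max_voice1 = max(durationlist_temp_voice1)
--     else:
--         duration_max_voice1 = 0
--     if len(durationlist_temp_voice2) >0:
--         duration_max_voice2 = max(durationlist_temp_voice2)
--     else:
--         duration_max_voice2 = 0
--     return duration_max_voice1, duration_max_voice2
-- ===== SOURCE B (Python) =====
-- def calculateDurationForEachVoiceInvodMS(vodMS_input):
--     # Single pass: two running maxima (None = voice unseen), no temp lists.
--     max1 = None
--     max2 = None
--     for eachMS in vodMS_input:
--         if eachMS['voice'] == 1:
--             d = eachMS['duration']
--             max1 = d if max1 is None else max(max1, d)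
--         elif eachMS['voice'] == 2:
--             d = eachMS['duration']
--             max2 = d if max2 is None else max(max2, d)
--     return (0 if max1 is None else max1, 0 if max2 is None else max2)
-- ===== Notes on version B (the rewrite author's own statement) =====
-- stated objective: simpler
-- what changed: Replaces the two temporary duration lists and the separate max() reduction passes with a single pass maintaining two running maxima (None marks an unseen voice).
import Mathlib
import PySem

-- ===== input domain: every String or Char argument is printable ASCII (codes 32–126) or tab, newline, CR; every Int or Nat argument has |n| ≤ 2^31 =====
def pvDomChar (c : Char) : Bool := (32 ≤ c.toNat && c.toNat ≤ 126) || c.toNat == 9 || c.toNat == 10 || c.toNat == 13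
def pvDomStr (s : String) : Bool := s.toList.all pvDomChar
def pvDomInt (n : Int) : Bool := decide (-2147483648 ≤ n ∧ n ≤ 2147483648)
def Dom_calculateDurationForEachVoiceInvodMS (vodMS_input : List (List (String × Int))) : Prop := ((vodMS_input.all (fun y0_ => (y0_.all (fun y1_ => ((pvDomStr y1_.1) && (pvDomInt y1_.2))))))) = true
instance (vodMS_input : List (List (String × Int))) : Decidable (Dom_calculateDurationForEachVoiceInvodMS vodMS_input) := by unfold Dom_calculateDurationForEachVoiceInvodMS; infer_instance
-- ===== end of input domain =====

-- B replaces A's two temporary duration lists and separate max() passes with one pass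
-- keeping two Option-valued running maxima (simpler: O(1) extra space, no claim of speed).

-- ===== PORT A =====
-- one loop step of A: append the duration to the list for voice 1 / voice 2
def pvStepA (acc : List Int × List Int) (eachMS : List (String × Int)) : List Int × List Int :=
  if (PySem.Dict.mk eachMS).get? "voice" = some 1 then
    (acc.1 ++ [((PySem.Dict.mk eachMS).get? "duration").getD 0], acc.2)
  else if (PySem.Dict.mk eachMS).get? "voice" = some 2 then
    (acc.1, acc.2 ++ [((PySem.Dict.mk eachMS).get? "duration").getD 0])
  else acc

def calculateDurationForEachVoiceInvodMS (vodMS_input : List (List (String × Int))) : Int × Int :=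
  let lists := vodMS_input.foldl pvStepA ([], [])
  let duration_max_voice1 : Int :=
    if lists.1.length > 0 then (PySem.List.max? lists.1 (fun x => x)).getD 0 else 0
  let duration_max_voice2 : Int :=
    if lists.2.length > 0 then (PySem.List.max? lists.2 (fun x => x)).getD 0 else 0
  (duration_max_voice1, duration_max_voice2)

-- ===== PORT B =====
-- running max update: None means 'unseen so far'
def pvUpd (o : Option Int) (x : Int) : Option Int :=
  match o with
  | none => some x
  | some m => some (max m x)

def pvStepB (acc : Option Int × Option Int) (eachMS : List (String × Int)) : Option Int × Option Int :=
  if (PySem.Dict.mk eachMS).get? "voice" = some 1 then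
    (pvUpd acc.1 (((PySem.Dict.mk eachMS).get? "duration").getD 0), acc.2)
  else if (PySem.Dict.mk eachMS).get? "voice" = some 2 then
    (acc.1, pvUpd acc.2 (((PySem.Dict.mk eachMS).get? "duration").getD 0))
  else acc

def calculateDurationForEachVoiceInvodMS_alt (vodMS_input : List (List (String × Int))) : Int × Int :=
  let acc := vodMS_input.foldl pvStepB (none, none)
  (acc.1.getD 0, acc.2.getD 0)

-- ===== PRECONDITION & SPEC =====
-- Pre_ excludes exactly the inputs on which the Python A raises KeyError: a dict without
-- the key 'voice', or with voice 1/2 but no key 'duration' (B raises there too).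
def Pre_calculateDurationForEachVoiceInvodMS (vodMS_input : List (List (String × Int))) : Prop :=
  ∀ eachMS ∈ vodMS_input, ((PySem.Dict.mk eachMS).get? "voice").isSome ∧
    (((PySem.Dict.mk eachMS).get? "voice" = some 1 ∨ (PySem.Dict.mk eachMS).get? "voice" = some 2) →
      ((PySem.Dict.mk eachMS).get? "duration").isSome)
instance (vodMS_input : List (List (String × Int))) : Decidable (Pre_calculateDurationForEachVoiceInvodMS vodMS_input) := by unfold Pre_calculateDurationForEachVoiceInvodMS; infer_instance

def pvWitness_calculateDurationForEachVoiceInvodMS : (List (List (String × Int))) :=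
  [[("voice", 1), ("duration", 5)], [("voice", 2), ("duration", 7)], [("voice", 3)]]

def Spec_calculateDurationForEachVoiceInvodMS (vodMS_input : List (List (String × Int))) (out : Int × Int) : Prop := out = calculateDurationForEachVoiceInvodMS_alt vodMS_input
instance (vodMS_input : List (List (String × Int))) (out : Int × Int) : Decidable (Spec_calculateDurationForEachVoiceInvodMS vodMS_input out) := by unfold Spec_calculateDurationForEachVoiceInvodMS; infer_instance

-- ===== CLAIM (what is proved, stated in full; the proofs are below) =====
def Claim_equal_calculateDurationForEachVoiceInvodMS : Prop := ∀ (vodMS_input : List (List (String × Int))), Dom_calculateDurationForEachVoiceInvodMS vodMS_input → Pre_calculateDurationForEachVoiceInvodMS vodMS_input → Spec_calculateDurationForEachVoiceInvodMS vodMS_input (calculateDurationForEachVoiceInvodMS vodMS_input)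

-- ===== LEMMAS AND PROOFS =====

-- running max over a list, starting unseen
def pvToM (l : List Int) : Option Int := l.foldl pvUpd none

theorem pvToM_append (l : List Int) (x : Int) : pvToM (l ++ [x]) = pvUpd (pvToM l) x := by
  simp [pvToM, List.foldl_append]

-- B's fold tracks the running max of A's fold's lists
theorem fold_rel (xs : List (List (String × Int))) : ∀ l1 l2 : List Int,
    xs.foldl pvStepB (pvToM l1, pvToM l2) =
      (pvToM (xs.foldl pvStepA (l1, l2)).1, pvToM (xs.foldl pvStepA (l1, l2)).2) := by
  induction xs with
  | nil => intro l1 l2; rfl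
  | cons d t ih =>
    intro l1 l2
    simp only [List.foldl_cons]
    by_cases h1 : (PySem.Dict.mk d).get? "voice" = some 1
    · simpa [pvStepB, pvStepA, h1, ← pvToM_append] using
        ih (l1 ++ [((PySem.Dict.mk d).get? "duration").getD 0]) l2
    · by_cases h2 : (PySem.Dict.mk d).get? "voice" = some 2
      · simpa [pvStepB, pvStepA, h1, h2, ← pvToM_append] using
          ih l1 (l2 ++ [((PySem.Dict.mk d).get? "duration").getD 0])
      · simpa [pvStepB, pvStepA, h1, h2] using ih l1 l2

theorem foldl_upd_some (t : List Int) : ∀ x : Int, t.foldl pvUpd (some x) = some (t.foldl max x) := by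
  induction t with
  | nil => intro x; rfl
  | cons y t ih => intro x; simp [pvUpd, ih]

-- A's max-or-0 of a list equals B's running max converted from Option
theorem toM_getD (l : List Int) :
    (if l.length > 0 then (PySem.List.max? l (fun x => x)).getD 0 else 0) = (pvToM l).getD 0 := by
  cases l with
  | nil => rfl
  | cons x t =>
    simp only [List.length_cons, PySem.List.max?_id_cons, Option.getD_some, pvToM,
      List.foldl_cons, show pvUpd none x = some x from rfl, foldl_upd_some]
    simp

-- ===== VERDICT (by name: the statement is the Claim_ definition above) =====
theorem calculateDurationForEachVoiceInvodMS_spec : Claim_equal_calculateDurationForEachVoiceInvodMS := by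
  intro xs _ _
  show _ = _
  simp only [calculateDurationForEachVoiceInvodMS, calculateDurationForEachVoiceInvodMS_alt]
  rw [show ((none, none) : Option Int × Option Int) = (pvToM [], pvToM []) from rfl,
    fold_rel xs [] []]
  simp [toM_getD]
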